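-- pv_equiv track=rewrite | github.com/FedericoRubbi/genetic-coding | utils/check_lark_import_dag.py | count_leading_dots
-- ===== SOURCE A (Python) =====
-- def count_leading_dots(s: str) -> int:
--     n = 0
--     for ch in s:
--         if ch == '.':
--             n += 1
--         else:
--             break
--     return n
-- ===== SOURCE B (Python) =====
-- def count_leading_dots(s: str) -> int:
--     # Binary search for the largest k such that the first k characters are all dots.
--     # The predicate "s[:k] consists only of dots" is monotone (downward closed) in k,
--     # so binary search over k in [0, len(s)] finds the count of leading dots.
--     lo, hi = 0, len(s)
--     while lo < hi:
--         mid = (lo + hi + 1) // 2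
--         if s[:mid] == '.' * mid:
--             lo = mid
--         else:
--             hi = mid - 1
--     return lo
-- ===== Notes on version B (the rewrite author's own statement) =====
-- stated objective: alternative
-- what changed: Replaces A's left-to-right counting scan with a binary search over prefix length k for the largest k whose prefix s[:k] is all dots, exploiting that this predicate is monotone in k.
import Mathlib
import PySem

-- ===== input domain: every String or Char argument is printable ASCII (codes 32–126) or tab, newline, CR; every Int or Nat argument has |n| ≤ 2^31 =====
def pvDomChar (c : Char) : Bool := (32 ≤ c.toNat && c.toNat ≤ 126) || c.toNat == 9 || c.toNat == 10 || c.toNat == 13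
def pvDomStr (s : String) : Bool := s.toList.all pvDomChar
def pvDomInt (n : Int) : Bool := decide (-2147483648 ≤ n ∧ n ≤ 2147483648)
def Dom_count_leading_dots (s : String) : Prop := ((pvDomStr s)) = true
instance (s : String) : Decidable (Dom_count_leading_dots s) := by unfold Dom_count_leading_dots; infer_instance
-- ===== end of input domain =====

-- B replaces A's left-to-right counting scan by a binary search over the prefix
-- length k for the largest k with s[:k] all dots (the predicate is monotone in k).
-- ===== PORT A =====
-- the for-loop with counter n and break, as structural recursion over the characters
def cldLoop : List Char → Int → Int
  | [], n => n
  | c :: rest, n => if c = '.' then cldLoop rest (n + 1) else n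

def count_leading_dots (s : String) : Int := cldLoop s.toList 0

-- ===== PORT B =====
-- midpoint bound used by the loop's termination argument (cited in decreasing_by)
theorem bsMid_bounds (lo hi : Int) (h : lo < hi) :
    lo < PySem.Int.floordiv (lo + hi + 1) 2 ∧ PySem.Int.floordiv (lo + hi + 1) 2 ≤ hi := by
  rw [PySem.Int.floordiv_eq_ediv_of_pos (by omega)]
  omega

-- the while-loop of Source B: lo, hi state; s[:mid] is List.slice, '.'*mid is pyRepeat
def bsLoop (l : List Char) (lo hi : Int) : Int :=
  if h : lo < hi then
    let mid := PySem.Int.floordiv (lo + hi + 1) 2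
    if PySem.List.slice l none (some mid) = PySem.List.pyRepeat ['.'] mid then
      bsLoop l mid hi
    else
      bsLoop l lo (mid - 1)
  else lo
termination_by (hi - lo).toNat
decreasing_by
  · have := bsMid_bounds lo hi h; omega
  · have := bsMid_bounds lo hi h; omega

def count_leading_dots_alt (s : String) : Int :=
  bsLoop s.toList 0 (s.toList.length : Int)

-- ===== PRECONDITION & SPEC =====
def Spec_count_leading_dots (s : String) (out : Int) : Prop := out = count_leading_dots_alt s
instance (s : String) (out : Int) : Decidable (Spec_count_leading_dots s out) := by unfold Spec_count_leading_dots; infer_instance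

-- ===== CLAIM (what is proved, stated in full; the proofs are below) =====
def Claim_equal_count_leading_dots : Prop := ∀ (s : String), Dom_count_leading_dots s → Spec_count_leading_dots s (count_leading_dots s)

-- ===== LEMMAS AND PROOFS =====
-- A's loop counts the leading dots: n plus the takeWhile length
theorem cldLoop_eq (l : List Char) (n : Int) :
    cldLoop l n = n + ((l.takeWhile (· == '.')).length : Int) := by
  induction l generalizing n with
  | nil => simp [cldLoop]
  | cons c rest ih =>
    by_cases h : c = '.'
    · simp [cldLoop, h, List.takeWhile, ih]; omega
    · simp [cldLoop, h, List.takeWhile, beq_eq_false_iff_ne.mpr h]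

-- the probe of the binary search is the monotone predicate "k ≤ number of leading dots"
theorem take_replicate_iff (l : List Char) (k : Nat) :
    l.take k = List.replicate k '.' ↔ k ≤ (l.takeWhile (· == '.')).length := by
  induction l generalizing k with
  | nil =>
    cases k with
    | zero => simp
    | succ m => simp [List.replicate]
  | cons c rest ih =>
    cases k with
    | zero => simp
    | succ m =>
      by_cases h : c = '.'
      · simp [List.take, List.replicate, h, List.takeWhile, ih]
      · simp [List.take, List.replicate, List.takeWhile, beq_eq_false_iff_ne.mpr h, h]

-- loop invariant: lo ≤ (leading-dot count) ≤ hi ≤ length, 0 ≤ lo ⟹ the loop returns the count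
theorem bsLoop_correct (l : List Char) (lo hi : Int)
    (hlo0 : 0 ≤ lo) (hloc : lo ≤ ((l.takeWhile (· == '.')).length : Int))
    (hchi : ((l.takeWhile (· == '.')).length : Int) ≤ hi) (hhil : hi ≤ (l.length : Int)) :
    bsLoop l lo hi = ((l.takeWhile (· == '.')).length : Int) := by
  generalize hm : (hi - lo).toNat = m
  induction m using Nat.strong_induction_on generalizing lo hi with
  | _ m ih =>
    by_cases h : lo < hi
    · have hmid := bsMid_bounds lo hi h
      set mid := PySem.Int.floordiv (lo + hi + 1) 2 with hmiddef
      have hmid0 : 0 ≤ mid := by omega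
      have hcond : (PySem.List.slice l none (some mid) = PySem.List.pyRepeat ['.'] mid)
          ↔ mid ≤ ((l.takeWhile (· == '.')).length : Int) := by
        rw [PySem.List.slice_to _ hmid0, PySem.List.pyRepeat_singleton,
          take_replicate_iff]
        omega
      rw [bsLoop, dif_pos h, ← hmiddef]
      by_cases hc : mid ≤ ((l.takeWhile (· == '.')).length : Int)
      · rw [if_pos (hcond.mpr hc)]
        exact ih (hi - mid).toNat (by omega) mid hi (by omega) hc hchi hhil rfl
      · rw [if_neg (fun hx => hc (hcond.mp hx))]
        exact ih (mid - 1 - lo).toNat (by omega) lo (mid - 1) hlo0 hloc (by omega)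
          (by omega) rfl
    · rw [bsLoop, dif_neg h]; omega

-- ===== VERDICT (by name: the statement is the Claim_ definition above) =====
theorem count_leading_dots_spec : Claim_equal_count_leading_dots := by
  intro s _
  unfold Spec_count_leading_dots count_leading_dots count_leading_dots_alt
  rw [cldLoop_eq, bsLoop_correct]
  · omega
  · omega
  · exact_mod_cast Nat.zero_le _
  · exact_mod_cast List.Sublist.length_le (List.takeWhile_sublist _)
  · exact le_refl _
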